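-- pv_equiv track=rewrite | github.com/johnzan0743/Python_Example | magic_7.py | magic_seven
-- ===== SOURCE A (Python) =====
-- def magic_seven(n):
--     index = 1
--     result = 0
--     flag = 1
--     while index < n+1:
--         if index%7 ==0 or '7' in str(index) :
--             result +=flag
--             flag = flag * -1
--         else:
--             result +=flag
--
--         index +=1
--     # if n%7 == 0 or '7' in str(n):
--     #     flag = flag * -1
--
--     # result +=flag
--
--     return result
-- ===== SOURCE B (Python) =====
-- def magic_seven(n):
--     if n < 1:
--         return 0
--     magics = [i for i in range(1, n + 1) if i % 7 == 0 or '7' in str(i)]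
--     sign, prev, result = 1, 0, 0
--     for m in magics:
--         result += sign * (m - prev)
--         sign, prev = -sign, m
--     return result + sign * (n - prev)
-- ===== Notes on version B (the rewrite author's own statement) =====
-- stated objective: alternative
-- what changed: Instead of iterating 1..n carrying a sign flag, B first collects the magic positions (divisible by 7 or containing digit '7') and computes the answer as a sum of signed run-lengths between consecutive magic positions plus a signed tail.
import Mathlib
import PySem

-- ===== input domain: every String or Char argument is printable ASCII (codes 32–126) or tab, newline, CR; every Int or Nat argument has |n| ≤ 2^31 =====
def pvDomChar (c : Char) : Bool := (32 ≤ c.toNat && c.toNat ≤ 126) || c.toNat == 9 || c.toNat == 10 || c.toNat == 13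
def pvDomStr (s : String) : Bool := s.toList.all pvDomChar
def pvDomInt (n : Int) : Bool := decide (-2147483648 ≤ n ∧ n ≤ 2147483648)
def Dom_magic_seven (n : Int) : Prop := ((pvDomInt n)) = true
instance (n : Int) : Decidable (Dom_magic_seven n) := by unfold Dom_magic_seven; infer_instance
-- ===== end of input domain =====

-- B replaces A's sign-flag scan over 1..n by a signed run-length sum over the list of magic positions (alternative decomposition, same cost).


-- ===== PORT A =====
-- shared helper: Python's 'index%7 == 0 or '7' in str(index)' (same expression in both sources)
def magicQ (i : Int) : Bool :=
  (PySem.Int.mod i 7 == 0) || PySem.Str.isIn "7" (PySem.Int.toStr i)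

-- A's while loop (index = 1; while index < n+1: …; index += 1) as a fold over range 1..n with state (result, flag)
def magic_seven (n : Int) : Int :=
  ((PySem.List.pyRange 1 (n + 1) 1).foldl
    (fun (st : Int × Int) index =>
      if magicQ index then (st.1 + st.2, st.2 * (-1)) else (st.1 + st.2, st.2))
    (0, 1)).1

-- ===== PORT B =====
def magic_seven_alt (n : Int) : Int :=
  if n < 1 then 0
  else
    let magics := (PySem.List.pyRange 1 (n + 1) 1).filter magicQ
    let st := magics.foldl
      (fun (t : Int × Int × Int) m => (-t.1, m, t.2.2 + t.1 * (m - t.2.1)))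
      (1, 0, 0)
    st.2.2 + st.1 * (n - st.2.1)

-- ===== PRECONDITION & SPEC =====
def Spec_magic_seven (n : Int) (out : Int) : Prop := out = magic_seven_alt n
instance (n : Int) (out : Int) : Decidable (Spec_magic_seven n out) := by unfold Spec_magic_seven; infer_instance

-- ===== CLAIM (what is proved, stated in full; the proofs are below) =====
def Claim_equal_magic_seven : Prop := ∀ (n : Int), Dom_magic_seven n → Spec_magic_seven n (magic_seven n)

-- ===== LEMMAS AND PROOFS =====

-- Loop correspondence: A's fold over a consecutive block a..a+k-1 from state (r, f)
-- equals B's fold over the magic elements of that block from (f, p, s), read off at the block's end,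
-- provided the invariant r = s + f*(a-1-p) links the two states.
lemma magic_main (k : Nat) : ∀ (a r f p s : Int), r = s + f * (a - 1 - p) →
    ((PySem.List.pyRange a (a + k) 1).foldl
      (fun (st : Int × Int) index =>
        if magicQ index then (st.1 + st.2, st.2 * (-1)) else (st.1 + st.2, st.2)) (r, f)).1
    =
    (let st := ((PySem.List.pyRange a (a + k) 1).filter magicQ).foldl
        (fun (t : Int × Int × Int) m => (-t.1, m, t.2.2 + t.1 * (m - t.2.1))) (f, p, s)
     st.2.2 + st.1 * ((a + k - 1) - st.2.1)) := by
  induction k with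
  | zero =>
      intro a r f p s h
      simp [PySem.List.pyRange_one_eq_nil (le_refl a)]
      linarith
  | succ k ih =>
      intro a r f p s h
      rw [show (a + ((k + 1 : Nat) : Int)) = (a + 1) + (k : Int) by push_cast; ring]
      rw [PySem.List.pyRange_one_cons (by omega)]
      by_cases hm : magicQ a
      · rw [List.filter_cons_of_pos hm, List.foldl_cons, List.foldl_cons, if_pos hm,
            show (-f : Int) = f * (-1) by ring]
        exact ih (a + 1) (r + f) (f * (-1)) a (s + f * (a - p)) (by linear_combination h)
      · rw [List.filter_cons_of_neg (by simpa using hm), List.foldl_cons, if_neg hm]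
        exact ih (a + 1) (r + f) f p s (by linear_combination h)

-- ===== VERDICT (by name: the statement is the Claim_ definition above) =====
theorem magic_seven_spec : Claim_equal_magic_seven := by
  intro n _
  unfold Spec_magic_seven magic_seven magic_seven_alt
  by_cases hn : n < 1
  · rw [if_pos hn, PySem.List.pyRange_one_eq_nil (by omega : n + 1 ≤ 1)]
    simp
  · rw [if_neg hn]
    have hk : n + 1 = 1 + (n.toNat : Int) := by omega
    rw [hk]
    have hmain := magic_main n.toNat 1 0 1 0 0 (by ring)
    simp only at hmain
    rw [hmain, show (1 : Int) + (n.toNat : Int) - 1 = n by omega]
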